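-- pv_equiv track=rewrite | github.com/rapyuta-robotics/jupyter_ros_utils | cpp/scripts/generate_cling_3rd_party.py | split_flags
-- ===== SOURCE A (Python) =====
-- from typing import List, Tuple
--
-- def split_flags(flags: List[str])->Tuple[List[str], List[str], List[str]]:
--     """
--     Split flags into include_paths, library_paths, or libraries
--     """
--     include_paths = list()
--     library_paths = list()
--     libraries = list()
--
--     for flag in flags:
--         if flag.startswith("-I"):
--             include_paths.append(flag[2:])
--         elif flag.startswith("-L"):
--             library_paths.append(flag[2:])
--         elif flag.startswith("-l"):
--             libraries.append(flag[2:])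
--         else:
--             libraries.append(flag)
--
--     return include_paths, library_paths, libraries
-- ===== SOURCE B (Python) =====
-- from typing import List, Tuple
--
-- def split_flags(flags: List[str]) -> Tuple[List[str], List[str], List[str]]:
--     """
--     Divide-and-conquer: classification is a list homomorphism, so classify
--     each half recursively and concatenate the three result lists pointwise.
--     """
--     n = len(flags)
--     if n == 0:
--         return [], [], []
--     if n == 1:
--         f = flags[0]
--         if f.startswith("-I"):
--             return [f[2:]], [], []
--         if f.startswith("-L"):
--             return [], [f[2:]], []
--         if f.startswith("-l"):
--             return [], [], [f[2:]]
--         return [], [], [f]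
--     mid = n // 2
--     li, ll, lb = split_flags(flags[:mid])
--     ri, rl, rb = split_flags(flags[mid:])
--     return li + ri, ll + rl, lb + rb
-- ===== Notes on version B (the rewrite author's own statement) =====
-- stated objective: alternative
-- what changed: Replaces A's single left-to-right classifying loop with a divide-and-conquer recursion: the list is split in half, each half classified recursively, and the three result lists concatenated pointwise (correct because classification is a list homomorphism).
import Mathlib
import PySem

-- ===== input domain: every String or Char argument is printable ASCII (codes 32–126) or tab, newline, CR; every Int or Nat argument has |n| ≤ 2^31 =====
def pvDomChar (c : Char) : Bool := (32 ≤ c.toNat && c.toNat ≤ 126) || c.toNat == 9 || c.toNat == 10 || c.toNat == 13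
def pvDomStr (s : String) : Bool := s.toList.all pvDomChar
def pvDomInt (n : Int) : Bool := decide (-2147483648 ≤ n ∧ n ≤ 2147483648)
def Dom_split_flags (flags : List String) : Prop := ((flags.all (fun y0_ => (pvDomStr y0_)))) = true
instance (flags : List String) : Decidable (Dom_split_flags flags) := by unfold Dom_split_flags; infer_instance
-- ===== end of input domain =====

-- B replaces A's single left-to-right classifying loop by a divide-and-conquer recursion
-- (split the list in half, classify each half, concatenate pointwise) — objective: alternative.
-- ===== PORT A =====
-- One classifying loop appending to three accumulators, like A.
def split_flags (flags : List String) : List String × List String × List String :=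
  flags.foldl
    (fun acc flag =>
      if PySem.Str.startswith flag "-I" then
        (acc.1 ++ [PySem.Str.slice flag (some 2) none], acc.2.1, acc.2.2)
      else if PySem.Str.startswith flag "-L" then
        (acc.1, acc.2.1 ++ [PySem.Str.slice flag (some 2) none], acc.2.2)
      else if PySem.Str.startswith flag "-l" then
        (acc.1, acc.2.1, acc.2.2 ++ [PySem.Str.slice flag (some 2) none])
      else
        (acc.1, acc.2.1, acc.2.2 ++ [flag]))
    ([], [], [])

-- ===== PORT B =====
-- Divide and conquer, following Source B: base cases n = 0 and n = 1 (the singleton is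
-- classified directly; matching 'f :: _' is flags[0] on a length-1 list), otherwise
-- recurse on flags[:mid] (= take mid) and flags[mid:] (= drop mid) for mid = n // 2
-- (both slice bounds are nonnegative, so take/drop is exact) and append pointwise.
def split_flags_alt (flags : List String) : List String × List String × List String :=
  if flags.length = 0 then ([], [], [])
  else if flags.length = 1 then
    match flags with
    | [] => ([], [], [])
    | f :: _ =>
      if PySem.Str.startswith f "-I" then ([PySem.Str.slice f (some 2) none], [], [])
      else if PySem.Str.startswith f "-L" then ([], [PySem.Str.slice f (some 2) none], [])
      else if PySem.Str.startswith f "-l" then ([], [], [PySem.Str.slice f (some 2) none])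
      else ([], [], [f])
  else
    let mid : Nat := flags.length / 2
    let l := split_flags_alt (flags.take mid)
    let r := split_flags_alt (flags.drop mid)
    (l.1 ++ r.1, l.2.1 ++ r.2.1, l.2.2 ++ r.2.2)
termination_by flags.length
decreasing_by
  · simp; omega
  · simp; omega

-- ===== PRECONDITION & SPEC =====
def Spec_split_flags (flags : List String) (out : List String × List String × List String) : Prop := out = split_flags_alt flags
instance (flags : List String) (out : List String × List String × List String) : Decidable (Spec_split_flags flags out) := by unfold Spec_split_flags; infer_instance

-- ===== CLAIM (what is proved, stated in full; the proofs are below) =====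
def Claim_equal_split_flags : Prop := ∀ (flags : List String), Dom_split_flags flags → Spec_split_flags flags (split_flags flags)

-- ===== LEMMAS AND PROOFS =====

-- Loop invariant: A's fold from any accumulator appends A's result from the empty accumulator.
theorem split_flags_fold (flags : List String) (a b c : List String) :
    flags.foldl
      (fun acc flag =>
        if PySem.Str.startswith flag "-I" then
          (acc.1 ++ [PySem.Str.slice flag (some 2) none], acc.2.1, acc.2.2)
        else if PySem.Str.startswith flag "-L" then
          (acc.1, acc.2.1 ++ [PySem.Str.slice flag (some 2) none], acc.2.2)
        else if PySem.Str.startswith flag "-l" then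
          (acc.1, acc.2.1, acc.2.2 ++ [PySem.Str.slice flag (some 2) none])
        else
          (acc.1, acc.2.1, acc.2.2 ++ [flag]))
      (a, b, c)
    = (a ++ (split_flags flags).1,
       b ++ (split_flags flags).2.1,
       c ++ (split_flags flags).2.2) := by
  induction flags generalizing a b c with
  | nil => simp [split_flags]
  | cons f fs ih =>
      by_cases hI : PySem.Str.startswith f "-I" = true <;>
        by_cases hL : PySem.Str.startswith f "-L" = true <;>
        by_cases hl : PySem.Str.startswith f "-l" = true <;>
        simp only [split_flags, List.foldl_cons, hI, hL, hl, Bool.false_eq_true,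
          if_true, if_false] <;>
        rw [ih, ih] <;> simp

-- A is a list homomorphism: classifying a concatenation concatenates the classifications.
theorem split_flags_append (xs ys : List String) :
    split_flags (xs ++ ys)
    = ((split_flags xs).1 ++ (split_flags ys).1,
       (split_flags xs).2.1 ++ (split_flags ys).2.1,
       (split_flags xs).2.2 ++ (split_flags ys).2.2) := by
  have h := split_flags_fold ys (split_flags xs).1 (split_flags xs).2.1 (split_flags xs).2.2
  calc split_flags (xs ++ ys)
      = (xs ++ ys).foldl _ ([], [], []) := rfl
    _ = ys.foldl _ (split_flags xs) := by rw [List.foldl_append]; rfl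
    _ = _ := h

-- B equals A, by strong induction on the length (the divide step via the homomorphism lemma).
theorem alt_eq_a_aux : ∀ (n : Nat) (flags : List String), flags.length = n →
    split_flags_alt flags = split_flags flags := by
  intro n
  induction n using Nat.strong_induction_on with
  | _ n ih =>
    intro flags hlen
    rw [split_flags_alt.eq_def]
    by_cases h0 : flags.length = 0
    · rw [List.length_eq_zero_iff] at h0; subst h0; simp [split_flags]
    · by_cases h1 : flags.length = 1
      · rw [List.length_eq_one_iff] at h1
        obtain ⟨f, rfl⟩ := h1
        simp only [List.length_cons, List.length_nil, if_false, if_true,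
          Nat.zero_add, Nat.one_ne_zero]
        simp [split_flags]
        split_ifs <;> rfl
      · simp only [h0, h1, if_false]
        have hlt : (flags.take (flags.length / 2)).length < n := by
          simp [List.length_take]; omega
        have hdt : (flags.drop (flags.length / 2)).length < n := by
          simp [List.length_drop]; omega
        rw [ih _ hlt _ rfl, ih _ hdt _ rfl]
        conv_rhs => rw [← List.take_append_drop (flags.length / 2) flags]
        rw [split_flags_append]

theorem split_flags_spec : Claim_equal_split_flags := by
  intro flags _
  unfold Spec_split_flags
  exact (alt_eq_a_aux flags.length flags rfl).symm

-- ===== VERDICT (by name: the statement is the Claim_ definition above) =====
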